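-- pv_equiv track=rewrite | github.com/AlexandreVaughan/aoc | 2023/src/day1.py | _replace_lettered_number
-- ===== SOURCE A (Python) =====
-- def _replace_lettered_number(line, char_index):
--     number_map = {
--         "one" : 1,
--         "two" : 2,
--         "three" : 3,
--         "four" : 4,
--         "five" : 5,
--         "six" : 6,
--         "seven" : 7,
--         "eight" : 8,
--         "nine" : 9,
--     }
--     for letters,value in number_map.items():
--         if line[char_index:].startswith(letters):
--             return (letters, str(value))
--     return ("","")
-- ===== SOURCE B (Python) =====
-- def _replace_lettered_number(line, char_index):
--     number_map = {
--         "one": 1, "two": 2, "three": 3, "four": 4, "five": 5,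
--         "six": 6, "seven": 7, "eight": 8, "nine": 9,
--     }
--     tail = line[char_index:]
--     for length in (3, 4, 5):
--         probe = tail[:length]
--         if probe in number_map:
--             return (probe, str(number_map[probe]))
--     return ("", "")
-- ===== Notes on version B (the rewrite author's own statement) =====
-- stated objective: alternative
-- what changed: B replaces the scan over all nine spelled-out words with a loop over the three possible word lengths (3,4,5), taking one fixed-width slice per length and looking it up in the word->digit dict, which is correct because no word is a prefix of another.
import Mathlib
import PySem

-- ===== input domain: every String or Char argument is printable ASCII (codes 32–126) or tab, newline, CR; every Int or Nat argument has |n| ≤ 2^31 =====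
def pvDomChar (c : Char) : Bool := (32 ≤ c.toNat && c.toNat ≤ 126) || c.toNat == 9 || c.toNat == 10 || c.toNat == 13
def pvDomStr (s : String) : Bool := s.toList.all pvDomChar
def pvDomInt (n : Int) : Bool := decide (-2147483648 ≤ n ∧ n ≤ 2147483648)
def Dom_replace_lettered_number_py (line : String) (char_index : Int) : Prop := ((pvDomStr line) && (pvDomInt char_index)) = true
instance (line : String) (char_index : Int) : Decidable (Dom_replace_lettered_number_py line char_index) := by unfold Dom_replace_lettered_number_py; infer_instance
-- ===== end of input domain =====

-- B probes the tail by word length (3,4,5) with one dict lookup each instead of scanning all nine words with startswith; alternative decomposition, same cost class.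


-- ===== PORT A =====
-- the word -> value table, in A's (= B's) insertion order
def pvNumberMap : List (String × Int) :=
  [("one", 1), ("two", 2), ("three", 3), ("four", 4), ("five", 5),
   ("six", 6), ("seven", 7), ("eight", 8), ("nine", 9)]

-- the 'for letters, value in number_map.items():' loop of A
def pvLoopA (tail : String) : List (String × Int) → String × String
  | [] => ("", "")
  | (letters, value) :: rest =>
    if PySem.Str.startswith tail letters then (letters, PySem.Int.toStr value)
    else pvLoopA tail rest

def replace_lettered_number_py (line : String) (char_index : Int) : String × String :=
  pvLoopA (PySem.Str.slice line (some char_index) none) pvNumberMap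

-- ===== PORT B =====
def pvNumberDict : PySem.Dict String Int := PySem.Dict.ofList pvNumberMap

-- the 'for length in (3, 4, 5):' loop of B
def pvLoopB (tail : String) : List Int → String × String
  | [] => ("", "")
  | length :: rest =>
    let probe := PySem.Str.slice tail none (some length)
    match PySem.Dict.get? pvNumberDict probe with
    | some v => (probe, PySem.Int.toStr v)
    | none => pvLoopB tail rest

def replace_lettered_number_py_alt (line : String) (char_index : Int) : String × String :=
  pvLoopB (PySem.Str.slice line (some char_index) none) [3, 4, 5]

-- ===== PRECONDITION & SPEC =====
def Spec_replace_lettered_number_py (line : String) (char_index : Int) (out : String × String) : Prop := out = replace_lettered_number_py_alt line char_index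
instance (line : String) (char_index : Int) (out : String × String) : Decidable (Spec_replace_lettered_number_py line char_index out) := by unfold Spec_replace_lettered_number_py; infer_instance

-- ===== CLAIM (what is proved, stated in full; the proofs are below) =====
def Claim_equal_replace_lettered_number_py : Prop := ∀ (line : String) (char_index : Int), Dom_replace_lettered_number_py line char_index → Spec_replace_lettered_number_py line char_index (replace_lettered_number_py line char_index)

-- ===== LEMMAS AND PROOFS =====

-- ===== VERDICT (by name: the statement is the Claim_ definition above) =====
lemma pvNoOther (w v r : List Char) (h1 : ¬ v <+: w) (h2 : ¬ w <+: v) : ¬ v <+: (w ++ r) := by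
  intro hv
  rcases List.prefix_or_prefix_of_prefix hv (List.prefix_append w r) with h | h
  exacts [h1 h, h2 h]

lemma pvSliceNe (t : String) (L : Int) (n : Nat) (kl : List Char)
    (hp : (PySem.Str.slice t none (some L)).toList = t.toList.take n)
    (h : ¬ kl <+: t.toList) : (PySem.Str.slice t none (some L)).toList ≠ kl := by
  intro he
  have hk : kl = t.toList.take n := by rw [← he, hp]
  exact h (hk ▸ List.take_prefix n t.toList)

lemma pvGetNone (p : String) (h1 : p.toList ≠ ['o', 'n', 'e']) (h2 : p.toList ≠ ['t', 'w', 'o']) (h3 : p.toList ≠ ['t', 'h', 'r', 'e', 'e']) (h4 : p.toList ≠ ['f', 'o', 'u', 'r']) (h5 : p.toList ≠ ['f', 'i', 'v', 'e']) (h6 : p.toList ≠ ['s', 'i', 'x']) (h7 : p.toList ≠ ['s', 'e', 'v', 'e', 'n']) (h8 : p.toList ≠ ['e', 'i', 'g', 'h', 't']) (h9 : p.toList ≠ ['n', 'i', 'n', 'e']) : PySem.Dict.get? pvNumberDict p = none := by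
  have s1 : p ≠ "one" := fun he => h1 (by rw [he]; decide)
  have s2 : p ≠ "two" := fun he => h2 (by rw [he]; decide)
  have s3 : p ≠ "three" := fun he => h3 (by rw [he]; decide)
  have s4 : p ≠ "four" := fun he => h4 (by rw [he]; decide)
  have s5 : p ≠ "five" := fun he => h5 (by rw [he]; decide)
  have s6 : p ≠ "six" := fun he => h6 (by rw [he]; decide)
  have s7 : p ≠ "seven" := fun he => h7 (by rw [he]; decide)
  have s8 : p ≠ "eight" := fun he => h8 (by rw [he]; decide)
  have s9 : p ≠ "nine" := fun he => h9 (by rw [he]; decide)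
  have e : pvNumberDict = PySem.Dict.mk pvNumberMap := by decide
  rw [e]
  simp [pvNumberMap, PySem.Dict.get?, Ne.symm s1, Ne.symm s2, Ne.symm s3, Ne.symm s4, Ne.symm s5, Ne.symm s6, Ne.symm s7, Ne.symm s8, Ne.symm s9]

theorem pvMain : ∀ (t : String), pvLoopA t pvNumberMap = pvLoopB t [3, 4, 5] := by
  intro t
  by_cases h1 : ['o', 'n', 'e'] <+: t.toList
  · obtain ⟨r, hr⟩ := h1
    have hA : ['o', 'n', 'e'] <+: t.toList := ⟨r, hr⟩
    have pt3 : (PySem.Str.slice t none (some (3:Int))).toList = t.toList.take 3 := by simp [pysem]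
    have e3 : t.toList.take 3 = ['o', 'n', 'e'] := by rw [← hr, List.take_append_of_le_length (by decide)]; decide
    have p3 : PySem.Str.slice t none (some (3:Int)) = "one" := String.toList_inj.mp (by rw [pt3, e3]; try decide)
    have g3 : PySem.Dict.get? pvNumberDict "one" = some 1 := by decide
    simp [pvLoopA, pvNumberMap, pvLoopB, PySem.Chars.startswith_iff, hA, p3, g3]
  by_cases h2 : ['t', 'w', 'o'] <+: t.toList
  · obtain ⟨r, hr⟩ := h2
    have hA : ['t', 'w', 'o'] <+: t.toList := ⟨r, hr⟩
    have n1 : ¬ (['o', 'n', 'e'] <+: t.toList) := by rw [← hr]; exact pvNoOther _ _ _ (by decide) (by decide)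
    have pt3 : (PySem.Str.slice t none (some (3:Int))).toList = t.toList.take 3 := by simp [pysem]
    have e3 : t.toList.take 3 = ['t', 'w', 'o'] := by rw [← hr, List.take_append_of_le_length (by decide)]; decide
    have p3 : PySem.Str.slice t none (some (3:Int)) = "two" := String.toList_inj.mp (by rw [pt3, e3]; try decide)
    have g3 : PySem.Dict.get? pvNumberDict "two" = some 2 := by decide
    simp [pvLoopA, pvNumberMap, pvLoopB, PySem.Chars.startswith_iff, hA, n1, p3, g3]
  by_cases h3 : ['t', 'h', 'r', 'e', 'e'] <+: t.toList
  · obtain ⟨r, hr⟩ := h3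
    have hA : ['t', 'h', 'r', 'e', 'e'] <+: t.toList := ⟨r, hr⟩
    have n1 : ¬ (['o', 'n', 'e'] <+: t.toList) := by rw [← hr]; exact pvNoOther _ _ _ (by decide) (by decide)
    have n2 : ¬ (['t', 'w', 'o'] <+: t.toList) := by rw [← hr]; exact pvNoOther _ _ _ (by decide) (by decide)
    have pt3 : (PySem.Str.slice t none (some (3:Int))).toList = t.toList.take 3 := by simp [pysem]
    have e3 : t.toList.take 3 = ['t', 'h', 'r'] := by rw [← hr, List.take_append_of_le_length (by decide)]; decide
    have p3 : PySem.Str.slice t none (some (3:Int)) = "thr" := String.toList_inj.mp (by rw [pt3, e3]; try decide)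
    have g3 : PySem.Dict.get? pvNumberDict "thr" = none := by decide
    have pt4 : (PySem.Str.slice t none (some (4:Int))).toList = t.toList.take 4 := by simp [pysem]
    have e4 : t.toList.take 4 = ['t', 'h', 'r', 'e'] := by rw [← hr, List.take_append_of_le_length (by decide)]; decide
    have p4 : PySem.Str.slice t none (some (4:Int)) = "thre" := String.toList_inj.mp (by rw [pt4, e4]; try decide)
    have g4 : PySem.Dict.get? pvNumberDict "thre" = none := by decide
    have pt5 : (PySem.Str.slice t none (some (5:Int))).toList = t.toList.take 5 := by simp [pysem]
    have e5 : t.toList.take 5 = ['t', 'h', 'r', 'e', 'e'] := by rw [← hr, List.take_append_of_le_length (by decide)]; decide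
    have p5 : PySem.Str.slice t none (some (5:Int)) = "three" := String.toList_inj.mp (by rw [pt5, e5]; try decide)
    have g5 : PySem.Dict.get? pvNumberDict "three" = some 3 := by decide
    simp [pvLoopA, pvNumberMap, pvLoopB, PySem.Chars.startswith_iff, hA, n1, n2, p3, p4, p5, g3, g4, g5]
  by_cases h4 : ['f', 'o', 'u', 'r'] <+: t.toList
  · obtain ⟨r, hr⟩ := h4
    have hA : ['f', 'o', 'u', 'r'] <+: t.toList := ⟨r, hr⟩
    have n1 : ¬ (['o', 'n', 'e'] <+: t.toList) := by rw [← hr]; exact pvNoOther _ _ _ (by decide) (by decide)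
    have n2 : ¬ (['t', 'w', 'o'] <+: t.toList) := by rw [← hr]; exact pvNoOther _ _ _ (by decide) (by decide)
    have n3 : ¬ (['t', 'h', 'r', 'e', 'e'] <+: t.toList) := by rw [← hr]; exact pvNoOther _ _ _ (by decide) (by decide)
    have pt3 : (PySem.Str.slice t none (some (3:Int))).toList = t.toList.take 3 := by simp [pysem]
    have e3 : t.toList.take 3 = ['f', 'o', 'u'] := by rw [← hr, List.take_append_of_le_length (by decide)]; decide
    have p3 : PySem.Str.slice t none (some (3:Int)) = "fou" := String.toList_inj.mp (by rw [pt3, e3]; try decide)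
    have g3 : PySem.Dict.get? pvNumberDict "fou" = none := by decide
    have pt4 : (PySem.Str.slice t none (some (4:Int))).toList = t.toList.take 4 := by simp [pysem]
    have e4 : t.toList.take 4 = ['f', 'o', 'u', 'r'] := by rw [← hr, List.take_append_of_le_length (by decide)]; decide
    have p4 : PySem.Str.slice t none (some (4:Int)) = "four" := String.toList_inj.mp (by rw [pt4, e4]; try decide)
    have g4 : PySem.Dict.get? pvNumberDict "four" = some 4 := by decide
    simp [pvLoopA, pvNumberMap, pvLoopB, PySem.Chars.startswith_iff, hA, n1, n2, n3, p3, p4, g3, g4]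
  by_cases h5 : ['f', 'i', 'v', 'e'] <+: t.toList
  · obtain ⟨r, hr⟩ := h5
    have hA : ['f', 'i', 'v', 'e'] <+: t.toList := ⟨r, hr⟩
    have n1 : ¬ (['o', 'n', 'e'] <+: t.toList) := by rw [← hr]; exact pvNoOther _ _ _ (by decide) (by decide)
    have n2 : ¬ (['t', 'w', 'o'] <+: t.toList) := by rw [← hr]; exact pvNoOther _ _ _ (by decide) (by decide)
    have n3 : ¬ (['t', 'h', 'r', 'e', 'e'] <+: t.toList) := by rw [← hr]; exact pvNoOther _ _ _ (by decide) (by decide)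
    have n4 : ¬ (['f', 'o', 'u', 'r'] <+: t.toList) := by rw [← hr]; exact pvNoOther _ _ _ (by decide) (by decide)
    have pt3 : (PySem.Str.slice t none (some (3:Int))).toList = t.toList.take 3 := by simp [pysem]
    have e3 : t.toList.take 3 = ['f', 'i', 'v'] := by rw [← hr, List.take_append_of_le_length (by decide)]; decide
    have p3 : PySem.Str.slice t none (some (3:Int)) = "fiv" := String.toList_inj.mp (by rw [pt3, e3]; try decide)
    have g3 : PySem.Dict.get? pvNumberDict "fiv" = none := by decide
    have pt4 : (PySem.Str.slice t none (some (4:Int))).toList = t.toList.take 4 := by simp [pysem]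
    have e4 : t.toList.take 4 = ['f', 'i', 'v', 'e'] := by rw [← hr, List.take_append_of_le_length (by decide)]; decide
    have p4 : PySem.Str.slice t none (some (4:Int)) = "five" := String.toList_inj.mp (by rw [pt4, e4]; try decide)
    have g4 : PySem.Dict.get? pvNumberDict "five" = some 5 := by decide
    simp [pvLoopA, pvNumberMap, pvLoopB, PySem.Chars.startswith_iff, hA, n1, n2, n3, n4, p3, p4, g3, g4]
  by_cases h6 : ['s', 'i', 'x'] <+: t.toList
  · obtain ⟨r, hr⟩ := h6
    have hA : ['s', 'i', 'x'] <+: t.toList := ⟨r, hr⟩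
    have n1 : ¬ (['o', 'n', 'e'] <+: t.toList) := by rw [← hr]; exact pvNoOther _ _ _ (by decide) (by decide)
    have n2 : ¬ (['t', 'w', 'o'] <+: t.toList) := by rw [← hr]; exact pvNoOther _ _ _ (by decide) (by decide)
    have n3 : ¬ (['t', 'h', 'r', 'e', 'e'] <+: t.toList) := by rw [← hr]; exact pvNoOther _ _ _ (by decide) (by decide)
    have n4 : ¬ (['f', 'o', 'u', 'r'] <+: t.toList) := by rw [← hr]; exact pvNoOther _ _ _ (by decide) (by decide)
    have n5 : ¬ (['f', 'i', 'v', 'e'] <+: t.toList) := by rw [← hr]; exact pvNoOther _ _ _ (by decide) (by decide)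
    have pt3 : (PySem.Str.slice t none (some (3:Int))).toList = t.toList.take 3 := by simp [pysem]
    have e3 : t.toList.take 3 = ['s', 'i', 'x'] := by rw [← hr, List.take_append_of_le_length (by decide)]; decide
    have p3 : PySem.Str.slice t none (some (3:Int)) = "six" := String.toList_inj.mp (by rw [pt3, e3]; try decide)
    have g3 : PySem.Dict.get? pvNumberDict "six" = some 6 := by decide
    simp [pvLoopA, pvNumberMap, pvLoopB, PySem.Chars.startswith_iff, hA, n1, n2, n3, n4, n5, p3, g3]
  by_cases h7 : ['s', 'e', 'v', 'e', 'n'] <+: t.toList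
  · obtain ⟨r, hr⟩ := h7
    have hA : ['s', 'e', 'v', 'e', 'n'] <+: t.toList := ⟨r, hr⟩
    have n1 : ¬ (['o', 'n', 'e'] <+: t.toList) := by rw [← hr]; exact pvNoOther _ _ _ (by decide) (by decide)
    have n2 : ¬ (['t', 'w', 'o'] <+: t.toList) := by rw [← hr]; exact pvNoOther _ _ _ (by decide) (by decide)
    have n3 : ¬ (['t', 'h', 'r', 'e', 'e'] <+: t.toList) := by rw [← hr]; exact pvNoOther _ _ _ (by decide) (by decide)
    have n4 : ¬ (['f', 'o', 'u', 'r'] <+: t.toList) := by rw [← hr]; exact pvNoOther _ _ _ (by decide) (by decide)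
    have n5 : ¬ (['f', 'i', 'v', 'e'] <+: t.toList) := by rw [← hr]; exact pvNoOther _ _ _ (by decide) (by decide)
    have n6 : ¬ (['s', 'i', 'x'] <+: t.toList) := by rw [← hr]; exact pvNoOther _ _ _ (by decide) (by decide)
    have pt3 : (PySem.Str.slice t none (some (3:Int))).toList = t.toList.take 3 := by simp [pysem]
    have e3 : t.toList.take 3 = ['s', 'e', 'v'] := by rw [← hr, List.take_append_of_le_length (by decide)]; decide
    have p3 : PySem.Str.slice t none (some (3:Int)) = "sev" := String.toList_inj.mp (by rw [pt3, e3]; try decide)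
    have g3 : PySem.Dict.get? pvNumberDict "sev" = none := by decide
    have pt4 : (PySem.Str.slice t none (some (4:Int))).toList = t.toList.take 4 := by simp [pysem]
    have e4 : t.toList.take 4 = ['s', 'e', 'v', 'e'] := by rw [← hr, List.take_append_of_le_length (by decide)]; decide
    have p4 : PySem.Str.slice t none (some (4:Int)) = "seve" := String.toList_inj.mp (by rw [pt4, e4]; try decide)
    have g4 : PySem.Dict.get? pvNumberDict "seve" = none := by decide
    have pt5 : (PySem.Str.slice t none (some (5:Int))).toList = t.toList.take 5 := by simp [pysem]
    have e5 : t.toList.take 5 = ['s', 'e', 'v', 'e', 'n'] := by rw [← hr, List.take_append_of_le_length (by decide)]; decide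
    have p5 : PySem.Str.slice t none (some (5:Int)) = "seven" := String.toList_inj.mp (by rw [pt5, e5]; try decide)
    have g5 : PySem.Dict.get? pvNumberDict "seven" = some 7 := by decide
    simp [pvLoopA, pvNumberMap, pvLoopB, PySem.Chars.startswith_iff, hA, n1, n2, n3, n4, n5, n6, p3, p4, p5, g3, g4, g5]
  by_cases h8 : ['e', 'i', 'g', 'h', 't'] <+: t.toList
  · obtain ⟨r, hr⟩ := h8
    have hA : ['e', 'i', 'g', 'h', 't'] <+: t.toList := ⟨r, hr⟩
    have n1 : ¬ (['o', 'n', 'e'] <+: t.toList) := by rw [← hr]; exact pvNoOther _ _ _ (by decide) (by decide)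
    have n2 : ¬ (['t', 'w', 'o'] <+: t.toList) := by rw [← hr]; exact pvNoOther _ _ _ (by decide) (by decide)
    have n3 : ¬ (['t', 'h', 'r', 'e', 'e'] <+: t.toList) := by rw [← hr]; exact pvNoOther _ _ _ (by decide) (by decide)
    have n4 : ¬ (['f', 'o', 'u', 'r'] <+: t.toList) := by rw [← hr]; exact pvNoOther _ _ _ (by decide) (by decide)
    have n5 : ¬ (['f', 'i', 'v', 'e'] <+: t.toList) := by rw [← hr]; exact pvNoOther _ _ _ (by decide) (by decide)
    have n6 : ¬ (['s', 'i', 'x'] <+: t.toList) := by rw [← hr]; exact pvNoOther _ _ _ (by decide) (by decide)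
    have n7 : ¬ (['s', 'e', 'v', 'e', 'n'] <+: t.toList) := by rw [← hr]; exact pvNoOther _ _ _ (by decide) (by decide)
    have pt3 : (PySem.Str.slice t none (some (3:Int))).toList = t.toList.take 3 := by simp [pysem]
    have e3 : t.toList.take 3 = ['e', 'i', 'g'] := by rw [← hr, List.take_append_of_le_length (by decide)]; decide
    have p3 : PySem.Str.slice t none (some (3:Int)) = "eig" := String.toList_inj.mp (by rw [pt3, e3]; try decide)
    have g3 : PySem.Dict.get? pvNumberDict "eig" = none := by decide
    have pt4 : (PySem.Str.slice t none (some (4:Int))).toList = t.toList.take 4 := by simp [pysem]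
    have e4 : t.toList.take 4 = ['e', 'i', 'g', 'h'] := by rw [← hr, List.take_append_of_le_length (by decide)]; decide
    have p4 : PySem.Str.slice t none (some (4:Int)) = "eigh" := String.toList_inj.mp (by rw [pt4, e4]; try decide)
    have g4 : PySem.Dict.get? pvNumberDict "eigh" = none := by decide
    have pt5 : (PySem.Str.slice t none (some (5:Int))).toList = t.toList.take 5 := by simp [pysem]
    have e5 : t.toList.take 5 = ['e', 'i', 'g', 'h', 't'] := by rw [← hr, List.take_append_of_le_length (by decide)]; decide
    have p5 : PySem.Str.slice t none (some (5:Int)) = "eight" := String.toList_inj.mp (by rw [pt5, e5]; try decide)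
    have g5 : PySem.Dict.get? pvNumberDict "eight" = some 8 := by decide
    simp [pvLoopA, pvNumberMap, pvLoopB, PySem.Chars.startswith_iff, hA, n1, n2, n3, n4, n5, n6, n7, p3, p4, p5, g3, g4, g5]
  by_cases h9 : ['n', 'i', 'n', 'e'] <+: t.toList
  · obtain ⟨r, hr⟩ := h9
    have hA : ['n', 'i', 'n', 'e'] <+: t.toList := ⟨r, hr⟩
    have n1 : ¬ (['o', 'n', 'e'] <+: t.toList) := by rw [← hr]; exact pvNoOther _ _ _ (by decide) (by decide)
    have n2 : ¬ (['t', 'w', 'o'] <+: t.toList) := by rw [← hr]; exact pvNoOther _ _ _ (by decide) (by decide)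
    have n3 : ¬ (['t', 'h', 'r', 'e', 'e'] <+: t.toList) := by rw [← hr]; exact pvNoOther _ _ _ (by decide) (by decide)
    have n4 : ¬ (['f', 'o', 'u', 'r'] <+: t.toList) := by rw [← hr]; exact pvNoOther _ _ _ (by decide) (by decide)
    have n5 : ¬ (['f', 'i', 'v', 'e'] <+: t.toList) := by rw [← hr]; exact pvNoOther _ _ _ (by decide) (by decide)
    have n6 : ¬ (['s', 'i', 'x'] <+: t.toList) := by rw [← hr]; exact pvNoOther _ _ _ (by decide) (by decide)
    have n7 : ¬ (['s', 'e', 'v', 'e', 'n'] <+: t.toList) := by rw [← hr]; exact pvNoOther _ _ _ (by decide) (by decide)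
    have n8 : ¬ (['e', 'i', 'g', 'h', 't'] <+: t.toList) := by rw [← hr]; exact pvNoOther _ _ _ (by decide) (by decide)
    have pt3 : (PySem.Str.slice t none (some (3:Int))).toList = t.toList.take 3 := by simp [pysem]
    have e3 : t.toList.take 3 = ['n', 'i', 'n'] := by rw [← hr, List.take_append_of_le_length (by decide)]; decide
    have p3 : PySem.Str.slice t none (some (3:Int)) = "nin" := String.toList_inj.mp (by rw [pt3, e3]; try decide)
    have g3 : PySem.Dict.get? pvNumberDict "nin" = none := by decide
    have pt4 : (PySem.Str.slice t none (some (4:Int))).toList = t.toList.take 4 := by simp [pysem]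
    have e4 : t.toList.take 4 = ['n', 'i', 'n', 'e'] := by rw [← hr, List.take_append_of_le_length (by decide)]; decide
    have p4 : PySem.Str.slice t none (some (4:Int)) = "nine" := String.toList_inj.mp (by rw [pt4, e4]; try decide)
    have g4 : PySem.Dict.get? pvNumberDict "nine" = some 9 := by decide
    simp [pvLoopA, pvNumberMap, pvLoopB, PySem.Chars.startswith_iff, hA, n1, n2, n3, n4, n5, n6, n7, n8, p3, p4, g3, g4]
  have pt3 : (PySem.Str.slice t none (some (3:Int))).toList = t.toList.take 3 := by simp [pysem]
  have pt4 : (PySem.Str.slice t none (some (4:Int))).toList = t.toList.take 4 := by simp [pysem]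
  have pt5 : (PySem.Str.slice t none (some (5:Int))).toList = t.toList.take 5 := by simp [pysem]
  have G3 : PySem.Dict.get? pvNumberDict (PySem.Str.slice t none (some (3:Int))) = none :=
    pvGetNone _ (pvSliceNe t 3 3 ['o', 'n', 'e'] pt3 h1) (pvSliceNe t 3 3 ['t', 'w', 'o'] pt3 h2) (pvSliceNe t 3 3 ['t', 'h', 'r', 'e', 'e'] pt3 h3) (pvSliceNe t 3 3 ['f', 'o', 'u', 'r'] pt3 h4) (pvSliceNe t 3 3 ['f', 'i', 'v', 'e'] pt3 h5) (pvSliceNe t 3 3 ['s', 'i', 'x'] pt3 h6) (pvSliceNe t 3 3 ['s', 'e', 'v', 'e', 'n'] pt3 h7) (pvSliceNe t 3 3 ['e', 'i', 'g', 'h', 't'] pt3 h8) (pvSliceNe t 3 3 ['n', 'i', 'n', 'e'] pt3 h9)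
  have G4 : PySem.Dict.get? pvNumberDict (PySem.Str.slice t none (some (4:Int))) = none :=
    pvGetNone _ (pvSliceNe t 4 4 ['o', 'n', 'e'] pt4 h1) (pvSliceNe t 4 4 ['t', 'w', 'o'] pt4 h2) (pvSliceNe t 4 4 ['t', 'h', 'r', 'e', 'e'] pt4 h3) (pvSliceNe t 4 4 ['f', 'o', 'u', 'r'] pt4 h4) (pvSliceNe t 4 4 ['f', 'i', 'v', 'e'] pt4 h5) (pvSliceNe t 4 4 ['s', 'i', 'x'] pt4 h6) (pvSliceNe t 4 4 ['s', 'e', 'v', 'e', 'n'] pt4 h7) (pvSliceNe t 4 4 ['e', 'i', 'g', 'h', 't'] pt4 h8) (pvSliceNe t 4 4 ['n', 'i', 'n', 'e'] pt4 h9)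
  have G5 : PySem.Dict.get? pvNumberDict (PySem.Str.slice t none (some (5:Int))) = none :=
    pvGetNone _ (pvSliceNe t 5 5 ['o', 'n', 'e'] pt5 h1) (pvSliceNe t 5 5 ['t', 'w', 'o'] pt5 h2) (pvSliceNe t 5 5 ['t', 'h', 'r', 'e', 'e'] pt5 h3) (pvSliceNe t 5 5 ['f', 'o', 'u', 'r'] pt5 h4) (pvSliceNe t 5 5 ['f', 'i', 'v', 'e'] pt5 h5) (pvSliceNe t 5 5 ['s', 'i', 'x'] pt5 h6) (pvSliceNe t 5 5 ['s', 'e', 'v', 'e', 'n'] pt5 h7) (pvSliceNe t 5 5 ['e', 'i', 'g', 'h', 't'] pt5 h8) (pvSliceNe t 5 5 ['n', 'i', 'n', 'e'] pt5 h9)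
  simp [pvLoopA, pvNumberMap, pvLoopB, PySem.Chars.startswith_iff, h1, h2, h3, h4, h5, h6, h7, h8, h9, G3, G4, G5]

theorem replace_lettered_number_py_spec : Claim_equal_replace_lettered_number_py := by
  intro line ci _
  unfold Spec_replace_lettered_number_py replace_lettered_number_py replace_lettered_number_py_alt
  exact pvMain _
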